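-- pv_equiv track=rewrite | github.com/tr1ten/DNA | companies/google/DescreasingSubseq.py | min_decreasing_partitions
-- ===== SOURCE A (Python) =====
-- from typing import List
-- from bisect import bisect_right as br,insort
--
-- def min_decreasing_partitions(arr: List[int]) -> int:
--     dp = [] # too bad sortedcontainers are not allowed
--     for x in arr:
--         ind = br(dp,x);
--         if(len(dp)>ind):
--             dp.pop(ind)
--         insort(dp,x)
--     return len(dp)
-- ===== SOURCE B (Python) =====
-- from typing import List
--
-- def min_decreasing_partitions(arr: List[int]) -> int:
--     # Quadratic DP: by Dilworth/patience duality, the minimum number of decreasing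
--     # partitions equals the length of the longest non-decreasing subsequence.
--     # For each element record the longest non-decreasing subsequence ending there,
--     # by scanning all previously recorded (value, length) pairs; answer = max length.
--     best = []  # (value, length) for each processed element
--     for x in arr:
--         best.append((x, 1 + max((l for v, l in best if v <= x), default=0)))
--     return max((l for _, l in best), default=0)
-- ===== Notes on version B (the rewrite author's own statement) =====
-- stated objective: alternative
-- what changed: B drops the sorted tails array entirely and uses the classic quadratic LIS dynamic programme: for each element it scans all previously recorded (value, length) pairs to find the longest non-decreasing subsequence ending there, and returns the maximum length, instead of A's bisect_right/pop/insort maintenance of a tails list.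
import Mathlib
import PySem

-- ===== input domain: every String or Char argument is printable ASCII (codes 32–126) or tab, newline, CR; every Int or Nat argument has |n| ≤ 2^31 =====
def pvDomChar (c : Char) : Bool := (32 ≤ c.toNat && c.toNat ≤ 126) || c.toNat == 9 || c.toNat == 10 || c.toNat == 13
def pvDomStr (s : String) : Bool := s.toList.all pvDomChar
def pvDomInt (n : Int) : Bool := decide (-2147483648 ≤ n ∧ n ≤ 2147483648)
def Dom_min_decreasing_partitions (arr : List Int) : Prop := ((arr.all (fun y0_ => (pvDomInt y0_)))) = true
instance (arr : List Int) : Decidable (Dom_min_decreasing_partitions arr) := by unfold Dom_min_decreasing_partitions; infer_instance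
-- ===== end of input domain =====

-- B replaces A's bisect/pop/insort tails array by the classic quadratic LIS dynamic
-- programme over (value, length) pairs (objective: alternative algorithm, same cost class).

-- ===== PORT A =====
-- bisect.bisect_right (stdlib, imported by A): binary search, lo/hi loop,
-- exact transcription of CPython's bisect_right (a[mid] is in range whenever read).
-- (the while lo < hi loop, ported with a fuel bound hi - lo ≤ fuel that only makes the
-- same computation total; each iteration strictly shrinks hi - lo, so the fuel suffices)
def pvBisectGo (l : List Int) (x : Int) : Nat → Nat → Nat → Nat
  | 0, lo, _ => lo
  | fuel + 1, lo, hi =>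
    if lo < hi then
      let mid := (lo + hi) / 2
      if x < l.getD mid 0 then pvBisectGo l x fuel lo mid
      else pvBisectGo l x fuel (mid + 1) hi
    else lo

def pvBisectRight (l : List Int) (x : Int) : Nat := pvBisectGo l x l.length 0 l.length

-- bisect.insort(a, x): a.insert(bisect_right(a, x), x); the index is a Nat ≤ len, so
-- Python's insert is exactly take/cons/drop.
def pvInsort (l : List Int) (x : Int) : List Int :=
  let j := pvBisectRight l x
  l.take j ++ x :: l.drop j

-- loop body of A: ind = br(dp,x); if len(dp)>ind: dp.pop(ind); insort(dp,x)
-- (dp.pop(ind) with 0 ≤ ind < len is exactly eraseIdx)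
def pvStepA (dp : List Int) (x : Int) : List Int :=
  let ind := pvBisectRight dp x
  let dp' := if dp.length > ind then dp.eraseIdx ind else dp
  pvInsort dp' x

def min_decreasing_partitions (arr : List Int) : Int :=
  ((arr.foldl pvStepA []).length : Int)

-- ===== PORT B =====
-- inner scan of B: max((l for v, l in best if v <= x), default=0)
-- (lengths are ≥ 1, so folding max from 0 is exactly Python's max with default=0)
def pvInnerMax (best : List (Int × Int)) (x : Int) : Int :=
  best.foldl (fun m p => if p.1 ≤ x then max m p.2 else m) 0

-- loop body of B: best.append((x, 1 + max(...)))
def pvStepD (best : List (Int × Int)) (x : Int) : List (Int × Int) :=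
  best ++ [(x, 1 + pvInnerMax best x)]

-- return max((l for _, l in best), default=0)
def min_decreasing_partitions_alt (arr : List Int) : Int :=
  (arr.foldl pvStepD []).foldl (fun m p => max m p.2) 0

-- ===== PRECONDITION & SPEC =====
def Spec_min_decreasing_partitions (arr : List Int) (out : Int) : Prop := out = min_decreasing_partitions_alt arr
instance (arr : List Int) (out : Int) : Decidable (Spec_min_decreasing_partitions arr out) := by unfold Spec_min_decreasing_partitions; infer_instance

-- ===== CLAIM (what is proved, stated in full; the proofs are below) =====
def Claim_equal_min_decreasing_partitions : Prop := ∀ (arr : List Int), Dom_min_decreasing_partitions arr → Spec_min_decreasing_partitions arr (min_decreasing_partitions arr)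

-- ===== LEMMAS AND PROOFS =====

-- Characterisation of the binary search on a sorted segment.
theorem pvBisectGo_spec (l : List Int) (x : Int)
    (hs : l.Pairwise (· ≤ ·)) :
    ∀ (d lo hi : Nat), hi - lo ≤ d → lo ≤ hi → hi ≤ l.length →
    (∀ j < lo, ∀ (hj : j < l.length), l[j] ≤ x) →
    (∀ j, hi ≤ j → ∀ (hj : j < l.length), x < l[j]) →
    lo ≤ pvBisectGo l x d lo hi ∧ pvBisectGo l x d lo hi ≤ hi ∧
    (∀ j < pvBisectGo l x d lo hi, ∀ (hj : j < l.length), l[j] ≤ x) ∧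
    (∀ j, pvBisectGo l x d lo hi ≤ j → ∀ (hj : j < l.length), x < l[j]) := by
  intro d
  induction d with
  | zero =>
    intro lo hi hd hlohi hhil hlo hhi
    have : lo = hi := by omega
    subst this
    simp only [pvBisectGo]
    exact ⟨le_refl _, le_refl _, hlo, hhi⟩
  | succ d ih =>
    intro lo hi hd hlohi hhil hlo hhi
    simp only [pvBisectGo]
    by_cases h : lo < hi
    · simp only [h, if_pos]
      have hmid1 : lo ≤ (lo + hi) / 2 := by omega
      have hmid2 : (lo + hi) / 2 < hi := by omega
      have hmidl : (lo + hi) / 2 < l.length := by omega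
      have hget : l.getD ((lo + hi) / 2) 0 = l[(lo + hi) / 2] := List.getD_eq_getElem l 0 hmidl
      have hpw := List.pairwise_iff_getElem.mp hs
      by_cases hc : x < l.getD ((lo + hi) / 2) 0
      · simp only [hc, if_pos]
        refine (ih lo ((lo+hi)/2) (by omega) hmid1 (by omega) hlo ?_).imp
          id (fun h2 => ⟨by omega, h2.2.1, h2.2.2⟩)
        intro j hj hjl
        rcases Nat.eq_or_lt_of_le hj with he | hlt
        · subst he; rw [hget] at hc; exact hc
        · have := hpw _ _ hmidl hjl hlt
          rw [hget] at hc; omega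
      · simp only [hc, if_neg, not_false_iff]
        refine (ih ((lo+hi)/2 + 1) hi (by omega) (by omega) hhil ?_ hhi).imp
          (by omega) id
        intro j hj hjl
        rcases Nat.lt_succ_iff_lt_or_eq.mp hj with hlt | he
        · rcases Nat.lt_or_ge j ((lo+hi)/2) with h1 | h1
          · have := hpw _ _ hjl hmidl h1
            rw [hget] at hc; omega
          · have : j = (lo+hi)/2 := by omega
            subst this; rw [hget] at hc; omega
        · subst he; rw [hget] at hc; omega
    · simp only [h, if_neg, not_false_iff]
      have : lo = hi := by omega
      subst this
      exact ⟨le_refl _, le_refl _, hlo, hhi⟩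

theorem pvBisectRight_spec (l : List Int) (x : Int) (hs : l.Pairwise (· ≤ ·)) :
    pvBisectRight l x ≤ l.length ∧
    (∀ j < pvBisectRight l x, ∀ (hj : j < l.length), l[j] ≤ x) ∧
    (∀ j, pvBisectRight l x ≤ j → ∀ (hj : j < l.length), x < l[j]) := by
  have := pvBisectGo_spec l x hs l.length 0 l.length (by omega) (Nat.zero_le _) (le_refl _)
    (by omega) (by omega)
  exact ⟨this.2.1, this.2.2⟩

-- uniqueness of the insertion point
theorem pvIp_unique (l : List Int) (x : Int) (i i' : Nat)
    (hi : i ≤ l.length) (hi' : i' ≤ l.length)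
    (h1 : ∀ j < i, ∀ (hj : j < l.length), l[j] ≤ x)
    (h2 : ∀ j, i ≤ j → ∀ (hj : j < l.length), x < l[j])
    (h1' : ∀ j < i', ∀ (hj : j < l.length), l[j] ≤ x)
    (h2' : ∀ j, i' ≤ j → ∀ (hj : j < l.length), x < l[j]) : i = i' := by
  rcases Nat.lt_trichotomy i i' with h | h | h
  · have hl : i < l.length := by omega
    have := h1' i h hl
    have := h2 i (le_refl _) hl
    omega
  · exact h
  · have hl : i' < l.length := by omega
    have := h1 i' h hl
    have := h2' i' (le_refl _) hl
    omega

-- proof helper: A's step, rewritten as "replace the first strictly larger tail, or append"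
def pvStepB (dp : List Int) (x : Int) : List Int :=
  let i := pvBisectRight dp x
  if i = dp.length then dp ++ [x] else dp.set i x

theorem pvStep_eq (dp : List Int) (x : Int) (hs : dp.Pairwise (· ≤ ·)) :
    pvStepA dp x = pvStepB dp x := by
  obtain ⟨hile, P1, P2⟩ := pvBisectRight_spec dp x hs
  by_cases hcase : pvBisectRight dp x = dp.length
  · simp only [pvStepA, pvStepB, pvInsort, hcase, gt_iff_lt, lt_irrefl, if_neg, if_pos,
      not_false_iff, List.take_length, List.drop_length]
  · have hilt : pvBisectRight dp x < dp.length := by omega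
    simp only [pvStepA, pvStepB, pvInsort, gt_iff_lt, hilt, if_pos, hcase, if_neg,
      not_false_iff]
    set i := pvBisectRight dp x with hidef
    rw [List.eraseIdx_eq_take_drop_succ]
    have hlt : (dp.take i).length = i := by
      simp [List.length_take]; omega
    have hEl : (dp.take i ++ dp.drop (i + 1)).length = dp.length - 1 := by
      simp [List.length_take, List.length_drop]; omega
    have hEget1 : ∀ j, j < i → ∀ (hj : j < (dp.take i ++ dp.drop (i + 1)).length),
        (dp.take i ++ dp.drop (i + 1))[j] = dp[j]'(by omega) := by
      intro j hj hje
      rw [List.getElem_append_left (by omega), List.getElem_take]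
    have hEget2 : ∀ j, i ≤ j → ∀ (hj : j < (dp.take i ++ dp.drop (i + 1)).length),
        (dp.take i ++ dp.drop (i + 1))[j] = dp[j + 1]'(by omega) := by
      intro j hj hje
      rw [List.getElem_append_right (by omega), List.getElem_drop]
      congr 1
      omega
    have hEs : (dp.take i ++ dp.drop (i + 1)).Pairwise (· ≤ ·) := by
      rw [← List.eraseIdx_eq_take_drop_succ]
      exact hs.sublist (List.eraseIdx_sublist dp i)
    obtain ⟨hile', Q1, Q2⟩ := pvBisectRight_spec (dp.take i ++ dp.drop (i + 1)) x hEs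
    have heq : pvBisectRight (dp.take i ++ dp.drop (i + 1)) x = i := by
      apply pvIp_unique (dp.take i ++ dp.drop (i + 1)) x _ i hile' (by omega) Q1 Q2
      · intro j hj hje
        rw [hEget1 j hj hje]
        exact P1 j hj _
      · intro j hj hje
        rw [hEget2 j hj hje]
        exact P2 (j + 1) (by omega) _
    rw [heq]
    have h1 : (dp.take i ++ dp.drop (i + 1)).take i = dp.take i := by
      rw [List.take_append_of_le_length (by omega), List.take_take, Nat.min_self]
    have h2 : (dp.take i ++ dp.drop (i + 1)).drop i = dp.drop (i + 1) := by
      rw [List.drop_append_of_le_length (by omega)]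
      simp
    rw [h1, h2, List.set_eq_take_cons_drop x hilt]

theorem pvStepB_sorted (dp : List Int) (x : Int) (hs : dp.Pairwise (· ≤ ·)) :
    (pvStepB dp x).Pairwise (· ≤ ·) := by
  obtain ⟨hile, P1, P2⟩ := pvBisectRight_spec dp x hs
  set i := pvBisectRight dp x with hidef
  unfold pvStepB
  rw [← hidef]
  by_cases hcase : i = dp.length
  · simp only [hcase, if_pos]
    rw [List.pairwise_append]
    refine ⟨hs, List.pairwise_singleton _ _, ?_⟩
    intro a ha b hb
    rw [List.mem_singleton] at hb
    subst hb
    obtain ⟨j, hj, rfl⟩ := List.mem_iff_getElem.mp ha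
    exact P1 j (by omega) hj
  · have hilt : i < dp.length := by omega
    simp only [hcase, if_neg, not_false_iff]
    rw [List.set_eq_take_cons_drop x hilt, List.pairwise_append]
    refine ⟨hs.sublist (List.take_sublist _ _), ?_, ?_⟩
    · rw [List.pairwise_cons]
      refine ⟨?_, hs.sublist (List.drop_sublist _ _)⟩
      intro b hb
      obtain ⟨j, hj, rfl⟩ := List.mem_iff_getElem.mp hb
      rw [List.getElem_drop]
      exact le_of_lt (P2 (i + 1 + j) (by omega) _)
    · intro a ha b hb
      obtain ⟨j, hj, rfl⟩ := List.mem_iff_getElem.mp ha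
      rw [List.getElem_take]
      have hax : dp[j]'(by simp at hj; omega) ≤ x := by
        apply P1 j _ _
        simp [List.length_take] at hj
        omega
      rcases List.mem_cons.mp hb with rfl | hb'
      · exact hax
      · obtain ⟨k, hk, rfl⟩ := List.mem_iff_getElem.mp hb'
        rw [List.getElem_drop]
        exact le_trans hax (le_of_lt (P2 (i + 1 + k) (by omega) _))

-- ---- generic facts about B's filtered max-fold ----
def pvInnerMaxFrom (x b : Int) (best : List (Int × Int)) : Int :=
  best.foldl (fun m p => if p.1 ≤ x then max m p.2 else m) b

theorem pvInnerMaxFrom_ge_init (x : Int) (best : List (Int × Int)) :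
    ∀ b, b ≤ pvInnerMaxFrom x b best := by
  induction best with
  | nil => intro b; simp [pvInnerMaxFrom]
  | cons q rest ih =>
    intro b
    simp only [pvInnerMaxFrom, List.foldl_cons]
    by_cases h : q.1 ≤ x
    · simp only [h, if_pos]
      exact le_trans (le_max_left b q.2) (ih _)
    · simp only [h, if_neg, not_false_iff]
      exact ih _

theorem pvInnerMaxFrom_le (x c : Int) (best : List (Int × Int)) :
    ∀ b, b ≤ c → (∀ p ∈ best, p.1 ≤ x → p.2 ≤ c) → pvInnerMaxFrom x b best ≤ c := by
  induction best with
  | nil => intro b hb _; simpa [pvInnerMaxFrom] using hb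
  | cons q rest ih =>
    intro b hb h
    simp only [pvInnerMaxFrom, List.foldl_cons]
    by_cases hq : q.1 ≤ x
    · simp only [hq, if_pos]
      exact ih _ (max_le hb (h q (List.mem_cons_self) hq))
        (fun p hp => h p (List.mem_cons_of_mem _ hp))
    · simp only [hq, if_neg, not_false_iff]
      exact ih _ hb (fun p hp => h p (List.mem_cons_of_mem _ hp))

theorem pvInnerMaxFrom_ge_mem (x : Int) (best : List (Int × Int)) :
    ∀ b, ∀ p ∈ best, p.1 ≤ x → p.2 ≤ pvInnerMaxFrom x b best := by
  induction best with
  | nil => intro b p hp; simp at hp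
  | cons q rest ih =>
    intro b p hp hpx
    simp only [pvInnerMaxFrom, List.foldl_cons]
    rcases List.mem_cons.mp hp with rfl | hp'
    · simp only [hpx, if_pos]
      exact le_trans (le_max_right b p.2) (pvInnerMaxFrom_ge_init x rest _)
    · by_cases hq : q.1 ≤ x
      · simp only [hq, if_pos]; exact ih _ p hp' hpx
      · simp only [hq, if_neg, not_false_iff]; exact ih _ p hp' hpx

-- the unfiltered output max of B
def pvOutMax (best : List (Int × Int)) : Int :=
  best.foldl (fun m p => max m p.2) 0

theorem pvOutMax_append (best : List (Int × Int)) (q : Int × Int) :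
    pvOutMax (best ++ [q]) = max (pvOutMax best) q.2 := by
  simp [pvOutMax, List.foldl_append]

-- ---- the joint invariant between A's tails array and B's (value, length) table ----
def pvInv (dp : List Int) (best : List (Int × Int)) : Prop :=
  dp.Pairwise (· ≤ ·) ∧
  (dp.length : Int) = pvOutMax best ∧
  (∀ p ∈ best, 1 ≤ p.2 ∧ p.2 ≤ (dp.length : Int)) ∧
  (∀ k, ∀ (hk : k < dp.length),
    (∃ p ∈ best, p.2 = (k : Int) + 1 ∧ p.1 = dp[k]) ∧
    (∀ p ∈ best, p.2 = (k : Int) + 1 → dp[k] ≤ p.1))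

theorem pvInnerMax_eq_bisect (dp : List Int) (best : List (Int × Int)) (x : Int)
    (hinv : pvInv dp best) : pvInnerMax best x = (pvBisectRight dp x : Int) := by
  obtain ⟨hs, hlen, hrange, hmin⟩ := hinv
  obtain ⟨hile, P1, P2⟩ := pvBisectRight_spec dp x hs
  set j := pvBisectRight dp x with hjdef
  apply le_antisymm
  · apply pvInnerMaxFrom_le x _ best 0 (by omega)
    intro p hp hpx
    by_contra hgt
    rw [Int.not_le] at hgt
    obtain ⟨h1, h2⟩ := hrange p hp
    have hk : ∃ k : Nat, p.2 = (k : Int) + 1 ∧ j ≤ k ∧ k < dp.length := by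
      refine ⟨(p.2 - 1).toNat, by omega, by omega, by omega⟩
    obtain ⟨k, hk1, hk2, hk3⟩ := hk
    have := (hmin k hk3).2 p hp hk1
    have := P2 k hk2 hk3
    omega
  · rcases Nat.eq_zero_or_pos j with h0 | hpos
    · rw [h0]; exact_mod_cast pvInnerMaxFrom_ge_init x best 0
    · have hk : j - 1 < dp.length := by omega
      have hdx : dp[j-1] ≤ x := P1 (j - 1) (by omega) hk
      obtain ⟨p, hp, hp2, hp1⟩ := (hmin (j - 1) hk).1
      have : ((j : Int)) = p.2 := by rw [hp2]; omega
      rw [this]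
      exact pvInnerMaxFrom_ge_mem x best 0 p hp (by rw [hp1]; exact hdx)

theorem pvInv_step (dp : List Int) (best : List (Int × Int)) (x : Int)
    (hinv : pvInv dp best) : pvInv (pvStepA dp x) (pvStepD best x) := by
  have hs := hinv.1
  rw [pvStep_eq dp x hs]
  have hm := pvInnerMax_eq_bisect dp best x hinv
  obtain ⟨_, hlen, hrange, hmin⟩ := hinv
  obtain ⟨hile, P1, P2⟩ := pvBisectRight_spec dp x hs
  set j := pvBisectRight dp x with hjdef
  clear_value j
  have hsorted := pvStepB_sorted dp x hs
  unfold pvStepD pvStepB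
  unfold pvStepB at hsorted
  rw [← hjdef] at hsorted ⊢
  rw [hm]
  by_cases hcase : j = dp.length
  · simp only [hcase, if_pos] at hsorted ⊢
    subst hcase
    refine ⟨hsorted, ?_, ?_, ?_⟩
    · rw [pvOutMax_append, ← hlen]
      simp only [List.length_append, List.length_singleton]
      push_cast
      omega
    · intro p hp
      rcases List.mem_append.mp hp with hp' | hp'
      · obtain ⟨h1, h2⟩ := hrange p hp'
        simp only [List.length_append, List.length_singleton]
        push_cast
        omega
      · rw [List.mem_singleton] at hp'
        subst hp'
        simp only [List.length_append, List.length_singleton]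
        push_cast
        omega
    · intro k hk
      simp only [List.length_append, List.length_singleton] at hk
      by_cases hkl : k < dp.length
      · have hget : (dp ++ [x])[k]'(by simp; omega) = dp[k] := List.getElem_append_left hkl
        constructor
        · obtain ⟨p, hp, hp2, hp1⟩ := (hmin k hkl).1
          exact ⟨p, List.mem_append_left _ hp, hp2, by rw [hget]; exact hp1⟩
        · intro p hp hp2
          rcases List.mem_append.mp hp with hp' | hp'
          · rw [hget]; exact (hmin k hkl).2 p hp' hp2
          · rw [List.mem_singleton] at hp'
            subst hp'
            simp only at hp2
            exfalso
            omega
      · have hkeq : k = dp.length := by omega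
        have hget : (dp ++ [x])[k]'(by simp; omega) = x := by
          subst hkeq; simp
        constructor
        · refine ⟨(x, 1 + (dp.length : Int)),
            List.mem_append_right _ (List.mem_singleton.mpr rfl), ?_, by rw [hget]⟩
          simp only
          omega
        · intro p hp hp2
          rcases List.mem_append.mp hp with hp' | hp'
          · exfalso
            obtain ⟨h1, h2⟩ := hrange p hp'
            rw [hp2] at h2
            omega
          · rw [List.mem_singleton] at hp'
            subst hp'
            rw [hget]
  · have hjlt : j < dp.length := by omega
    have hlset : (dp.set j x).length = dp.length := List.length_set ..
    simp only [hcase, if_neg, not_false_iff] at hsorted ⊢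
    refine ⟨hsorted, ?_, ?_, ?_⟩
    · rw [pvOutMax_append, ← hlen, hlset]
      simp only
      omega
    · intro p hp
      rw [hlset]
      rcases List.mem_append.mp hp with hp' | hp'
      · exact hrange p hp'
      · rw [List.mem_singleton] at hp'
        subst hp'
        simp only
        omega
    · intro k hk
      have hk' : k < dp.length := by omega
      by_cases hkj : k = j
      · subst hkj
        have hget : (dp.set k x)[k]'(by rw [hlset]; omega) = x :=
          List.getElem_set_self ..
        constructor
        · exact ⟨(x, 1 + (k : Int)), List.mem_append_right _ (List.mem_singleton.mpr rfl),
            by simp only; omega, by rw [hget]⟩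
        · intro p hp hp2
          rcases List.mem_append.mp hp with hp' | hp'
          · rw [hget]
            have := (hmin k hk').2 p hp' hp2
            have hxlt := P2 k (le_refl _) hk'
            omega
          · rw [List.mem_singleton] at hp'
            subst hp'
            rw [hget]
      · have hget : (dp.set j x)[k]'(by rw [hlset]; omega) = dp[k] :=
          List.getElem_set_ne (by omega) _
        constructor
        · obtain ⟨p, hp, hp2, hp1⟩ := (hmin k hk').1
          exact ⟨p, List.mem_append_left _ hp, hp2, by rw [hget]; exact hp1⟩
        · intro p hp hp2
          rcases List.mem_append.mp hp with hp' | hp'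
          · rw [hget]; exact (hmin k hk').2 p hp' hp2
          · rw [List.mem_singleton] at hp'
            subst hp'
            simp only at hp2
            exfalso
            omega

theorem pvInv_fold (arr : List Int) :
    ∀ dp best, pvInv dp best → pvInv (arr.foldl pvStepA dp) (arr.foldl pvStepD best) := by
  induction arr with
  | nil => intro dp best h; exact h
  | cons x xs ih =>
    intro dp best h
    simp only [List.foldl_cons]
    exact ih _ _ (pvInv_step dp best x h)

theorem pvInv_nil : pvInv [] [] := by
  refine ⟨List.Pairwise.nil, by simp [pvOutMax], ?_, ?_⟩
  · intro p hp; simp at hp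
  · intro k hk; simp at hk

-- ===== VERDICT (by name: the statement is the Claim_ definition above) =====
theorem min_decreasing_partitions_spec : Claim_equal_min_decreasing_partitions := by
  intro arr _
  unfold Spec_min_decreasing_partitions min_decreasing_partitions min_decreasing_partitions_alt
  have h := (pvInv_fold arr [] [] pvInv_nil).2.1
  exact h
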